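-- pv_equiv track=rewrite | github.com/signed-data/cds | mcp/ibge/server.py | _find_city
-- ===== SOURCE A (Python) =====
-- import unicodedata
--
-- def _normalize(text: str) -> str:
--     """Lowercase + strip accents for accent/case-insensitive matching."""
--     return unicodedata.normalize("NFKD", text.lower()).encode("ascii", "ignore").decode()
--
-- def _find_city(query: str, cities: list[dict]) -> dict | None:
--     """Find a city by IBGE code (numeric string) or name (exact then prefix)."""
--     if query.isdigit():
--         return next((c for c in cities if str(c["id"]) == query), None)
--     q = _normalize(query)
--     # exact match first
--     match = next((c for c in cities if _normalize(c["nome"]) == q), None)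
--     if match:
--         return match
--     # prefix match
--     return next((c for c in cities if _normalize(c["nome"]).startswith(q)), None)
-- ===== SOURCE B (Python) =====
-- import unicodedata
--
-- def _normalize(text: str) -> str:
--     """Lowercase + strip accents for accent/case-insensitive matching."""
--     return unicodedata.normalize("NFKD", text.lower()).encode("ascii", "ignore").decode()
--
-- def _find_city(query: str, cities: list[dict]) -> dict | None:
--     """Find a city by IBGE code (numeric string) or name (exact then prefix),
--     in ONE pass over cities: return immediately on the first exact name match,
--     remember the first prefix match as a fallback."""
--     if query.isdigit():
--         return next((c for c in cities if str(c["id"]) == query), None)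
--     q = _normalize(query)
--     cand = None
--     for c in cities:
--         n = _normalize(c["nome"])
--         if n == q:
--             return c
--         if cand is None and n.startswith(q):
--             cand = c
--     return cand
-- ===== Notes on version B (the rewrite author's own statement) =====
-- stated objective: alternative
-- what changed: The two separate next(...) scans over cities (exact-match pass, then prefix-match pass, each normalizing every name again) are replaced by a single loop that normalizes each name once, returns immediately on the first exact match and tracks the first prefix match as a fallback.
import Mathlib
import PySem

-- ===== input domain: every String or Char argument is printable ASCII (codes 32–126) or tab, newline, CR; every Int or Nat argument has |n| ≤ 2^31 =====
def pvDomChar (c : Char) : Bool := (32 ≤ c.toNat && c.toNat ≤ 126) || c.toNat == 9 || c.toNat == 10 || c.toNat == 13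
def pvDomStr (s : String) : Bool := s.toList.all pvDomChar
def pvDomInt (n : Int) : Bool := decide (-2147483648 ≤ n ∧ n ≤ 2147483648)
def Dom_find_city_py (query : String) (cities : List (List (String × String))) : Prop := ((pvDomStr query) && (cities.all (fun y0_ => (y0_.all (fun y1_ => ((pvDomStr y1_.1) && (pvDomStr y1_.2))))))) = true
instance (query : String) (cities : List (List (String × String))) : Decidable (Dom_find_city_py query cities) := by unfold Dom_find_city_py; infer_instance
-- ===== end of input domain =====

-- B replaces A's two next(...) scans (exact pass then prefix pass) by a single loop that
-- normalizes each name once, returns the first exact match immediately and keeps the first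
-- prefix match as fallback; same cost class, one pass instead of two (objective: alternative).


-- ===== PORT A =====
-- _normalize: on the ASCII domain, NFKD normalization and the ascii encode/decode round-trip
-- are the identity, so _normalize is exactly str.lower there.
def pvNormalize (s : String) : String := PySem.Str.lower s

-- c["id"] / c["nome"]: Python raises KeyError when the key is absent; those inputs are
-- excluded by Pre_find_city_py, the port reads "" there. ofList = dict(pairs) (last wins).
def pvId (c : List (String × String)) : String := (PySem.Dict.ofList c).getD "id" ""
def pvNome (c : List (String × String)) : String := (PySem.Dict.ofList c).getD "nome" ""
def pvHasId (c : List (String × String)) : Bool := (PySem.Dict.ofList c).contains "id"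
def pvHasNome (c : List (String × String)) : Bool := (PySem.Dict.ofList c).contains "nome"

-- next((c for c in cities if str(c["id"]) == query), None)   (shared verbatim by A and B)
def pvFindById (query : String) : List (List (String × String)) → Option (List (String × String))
  | [] => none
  | c :: cs => if pvId c = query then some c else pvFindById query cs

-- next((c for c in cities if _normalize(c["nome"]) == q), None)
def pvFindExact (q : String) : List (List (String × String)) → Option (List (String × String))
  | [] => none
  | c :: cs => if pvNormalize (pvNome c) = q then some c else pvFindExact q cs

-- next((c for c in cities if _normalize(c["nome"]).startswith(q)), None)
def pvFindPrefix (q : String) : List (List (String × String)) → Option (List (String × String))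
  | [] => none
  | c :: cs => if PySem.Str.startswith (pvNormalize (pvNome c)) q then some c
               else pvFindPrefix q cs

def find_city_py (query : String) (cities : List (List (String × String))) :
    Option (List (String × String)) :=
  if PySem.Str.strIsdigit query then pvFindById query cities
  else
    let q := pvNormalize query
    match pvFindExact q cities with
    | some m => if m.isEmpty then pvFindPrefix q cities else some m  -- `if match:` dict truthiness
    | none => pvFindPrefix q cities

-- ===== PORT B =====
-- the single for-loop of B: return on exact match, remember first prefix match in cand
def pvLoop (q : String) : List (List (String × String)) → Option (List (String × String)) →
    Option (List (String × String))
  | [], cand => cand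
  | c :: cs, cand =>
      let n := pvNormalize (pvNome c)
      if n = q then some c
      else pvLoop q cs (if cand.isNone && PySem.Str.startswith n q then some c else cand)

def find_city_py_alt (query : String) (cities : List (List (String × String))) :
    Option (List (String × String)) :=
  if PySem.Str.strIsdigit query then pvFindById query cities
  else pvLoop (pvNormalize query) cities none

-- ===== PRECONDITION & SPEC =====
-- Pre_ excludes exactly the inputs where the Python raises KeyError: a city missing the key
-- the taken branch reads ("id" resp. "nome") is reached before any match that stops the scan.
def Pre_find_city_py (query : String) (cities : List (List (String × String))) : Prop :=
  (PySem.Str.strIsdigit query = true →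
      (cities.takeWhile pvHasId = cities ∨
        ∃ c ∈ cities.takeWhile pvHasId, pvId c = query)) ∧
  (PySem.Str.strIsdigit query = false →
      (cities.takeWhile pvHasNome = cities ∨
        ∃ c ∈ cities.takeWhile pvHasNome, pvNormalize (pvNome c) = pvNormalize query))
instance (query : String) (cities : List (List (String × String))) : Decidable (Pre_find_city_py query cities) := by unfold Pre_find_city_py; infer_instance

def pvWitness_find_city_py : String × (List (List (String × String))) :=
  ("Bra", [[("id", "1501402"), ("nome", "Braga")], [("id", "3550308"), ("nome", "Sao Paulo")]])

def Spec_find_city_py (query : String) (cities : List (List (String × String))) (out : Option (List (String × String))) : Prop := out = find_city_py_alt query cities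
instance (query : String) (cities : List (List (String × String))) (out : Option (List (String × String))) : Decidable (Spec_find_city_py query cities out) := by unfold Spec_find_city_py; infer_instance

-- ===== CLAIM (what is proved, stated in full; the proofs are below) =====
def Claim_equal_find_city_py : Prop := ∀ (query : String) (cities : List (List (String × String))), Dom_find_city_py query cities → Pre_find_city_py query cities → Spec_find_city_py query cities (find_city_py query cities)

-- ===== LEMMAS AND PROOFS =====

-- B's loop, for any pending candidate, returns the first exact match if there is one,
-- otherwise the candidate, otherwise the first prefix match.
theorem pvLoop_eq (q : String) (cs : List (List (String × String))) :
    ∀ cand, pvLoop q cs cand =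
      match pvFindExact q cs with
      | some m => some m
      | none => match cand with
                | some c => some c
                | none => pvFindPrefix q cs := by
  induction cs with
  | nil => intro cand; cases cand <;> rfl
  | cons c cs ih =>
      intro cand
      by_cases hx : pvNormalize (pvNome c) = q
      · simp [pvLoop, pvFindExact, hx]
      · simp only [pvLoop, pvFindExact, if_neg hx, ih]
        cases hE : pvFindExact q cs with
        | some m => cases cand <;> simp
        | none =>
            cases cand with
            | some c₀ => simp
            | none =>
                cases hp : PySem.Chars.startswith (pvNormalize (pvNome c)).toList q.toList <;>
                  simp [pvFindPrefix, hp]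

theorem pvHasNome_ne_nil (c : List (String × String)) (h : pvHasNome c = true) : c ≠ [] := by
  intro hnil; subst hnil; exact absurd h (by decide)

-- under the precondition, the first exact match lies in the nome-complete prefix,
-- hence is a nonempty dict (truthy in Python).
theorem pvFindExact_ne_nil (q : String) (cs : List (List (String × String)))
    (hpre : cs.takeWhile pvHasNome = cs ∨
            ∃ c ∈ cs.takeWhile pvHasNome, pvNormalize (pvNome c) = q)
    (m : List (String × String)) (hm : pvFindExact q cs = some m) : m ≠ [] := by
  induction cs with
  | nil => simp [pvFindExact] at hm
  | cons c cs ih =>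
      by_cases hg : pvHasNome c = true
      · by_cases hx : pvNormalize (pvNome c) = q
        · simp [pvFindExact, hx] at hm
          subst hm; exact pvHasNome_ne_nil c hg
        · simp [pvFindExact, hx] at hm
          refine ih ?_ hm
          rcases hpre with h1 | ⟨c', hc', hcx⟩
          · left
            rw [List.takeWhile_cons_of_pos hg] at h1
            simp only [List.cons.injEq, true_and] at h1
            exact h1
          · rw [List.takeWhile_cons_of_pos hg] at hc'
            rcases List.mem_cons.mp hc' with rfl | hc'
            · exact absurd hcx hx
            · exact Or.inr ⟨c', hc', hcx⟩
      · exfalso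
        rcases hpre with h1 | ⟨c', hc', _⟩
        · rw [List.takeWhile_cons_of_neg (by simpa using hg)] at h1
          exact (List.cons_ne_nil c cs) h1.symm
        · rw [List.takeWhile_cons_of_neg (by simpa using hg)] at hc'
          simp at hc'

-- ===== VERDICT (by name: the statement is the Claim_ definition above) =====
theorem find_city_py_spec : Claim_equal_find_city_py := by
  intro query cities _ hpre
  unfold Spec_find_city_py find_city_py find_city_py_alt
  by_cases hd : PySem.Str.strIsdigit query = true
  · simp only [hd, if_true]
  · have hd' : PySem.Str.strIsdigit query = false := by simpa using hd
    simp only [hd', Bool.false_eq_true, if_false]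
    rw [pvLoop_eq]
    cases hE : pvFindExact (pvNormalize query) cities with
    | none => rfl
    | some m =>
        have hne : m ≠ [] := pvFindExact_ne_nil _ _ (hpre.2 hd') m hE
        simp [List.isEmpty_iff, hne]
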